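-- pv_equiv track=rewrite | github.com/Shadowedvaca/saltallthethings-site | scripts/label-speakers.py | gather_speaker_samples
-- ===== SOURCE A (Python) =====
-- from collections import defaultdict
--
-- UNKNOWN_LABEL = "Unknown"
--
-- def gather_speaker_samples(segments, max_samples=5):
--     """Return a dict of speaker_id -> list of sample text snippets."""
--     samples = defaultdict(list)
--     for seg in segments:
--         speaker = seg.get("speaker", UNKNOWN_LABEL)
--         text = seg.get("text", "").strip()
--         if text and len(samples[speaker]) < max_samples:
--             samples[speaker].append(text)
--     return samples
-- ===== SOURCE B (Python) =====
-- from collections import defaultdict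
--
-- UNKNOWN_LABEL = "Unknown"
--
-- def gather_speaker_samples(segments, max_samples=5):
--     """Return a dict of speaker_id -> list of sample text snippets."""
--     # pass 1: group ALL non-empty stripped texts per speaker
--     grouped = defaultdict(list)
--     for seg in segments:
--         text = seg.get("text", "").strip()
--         if text:
--             grouped[seg.get("speaker", UNKNOWN_LABEL)].append(text)
--     # pass 2: cap each speaker's list at max_samples (never a negative cap)
--     cap = max(max_samples, 0)
--     samples = defaultdict(list)
--     for speaker, texts in grouped.items():
--         samples[speaker] = texts[:cap]
--     return samples
-- ===== Notes on version B (the rewrite author's own statement) =====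
-- stated objective: alternative
-- what changed: A caps each speaker's list inside a single guarded pass over the segments; B first groups ALL non-empty stripped texts per speaker in one unguarded pass, then truncates each group to max_samples with slicing in a second pass over the grouped dict.
import Mathlib
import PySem

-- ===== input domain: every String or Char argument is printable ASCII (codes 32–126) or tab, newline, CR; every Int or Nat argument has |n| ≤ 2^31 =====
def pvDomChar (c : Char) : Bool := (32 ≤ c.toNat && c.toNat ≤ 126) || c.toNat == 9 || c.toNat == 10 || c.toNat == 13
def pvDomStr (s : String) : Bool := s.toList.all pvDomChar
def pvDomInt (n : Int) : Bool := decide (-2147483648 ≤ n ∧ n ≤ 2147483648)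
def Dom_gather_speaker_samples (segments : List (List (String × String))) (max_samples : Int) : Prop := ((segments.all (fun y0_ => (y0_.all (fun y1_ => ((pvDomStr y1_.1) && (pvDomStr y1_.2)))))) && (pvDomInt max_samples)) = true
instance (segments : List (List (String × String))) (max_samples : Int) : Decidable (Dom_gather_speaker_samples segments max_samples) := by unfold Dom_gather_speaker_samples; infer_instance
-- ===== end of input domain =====

-- B replaces A's single capped-while-collecting pass by group-everything then truncate-each-group: an alternative decomposition, not faster.

-- ===== PORT A =====
-- loop body of A's single pass (seg.get(...,default) is first-match lookup on the dict's items)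
def pvAStep (max_samples : Int) (samples : PySem.Dict String (List String)) (seg : List (String × String)) : PySem.Dict String (List String) :=
  let speaker := (PySem.Dict.mk seg).getD "speaker" "Unknown"
  let text := PySem.Str.strip ((PySem.Dict.mk seg).getD "text" "")
  if text ≠ "" then
    -- `samples[speaker]` on the defaultdict: reads the current list, creating the key if absent
    let cur := samples.getD speaker []
    let samples1 := if samples.contains speaker then samples else samples.insert speaker []
    if (cur.length : Int) < max_samples then samples1.insert speaker (cur ++ [text]) else samples1
  else samples

def gather_speaker_samples (segments : List (List (String × String))) (max_samples : Int) : List (String × List String) :=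
  (segments.foldl (pvAStep max_samples) PySem.Dict.empty).items

-- ===== PORT B =====
-- loop body of B's grouping pass: grouped[speaker].append(text) on a defaultdict(list)
def pvBGroupStep (g : PySem.Dict String (List String)) (seg : List (String × String)) : PySem.Dict String (List String) :=
  let text := PySem.Str.strip ((PySem.Dict.mk seg).getD "text" "")
  if text ≠ "" then (PySem.Dict.modify g ((PySem.Dict.mk seg).getD "speaker" "Unknown") [] (· ++ [text])) else g

def gather_speaker_samples_alt (segments : List (List (String × String))) (max_samples : Int) : List (String × List String) :=
  let grouped := segments.foldl pvBGroupStep PySem.Dict.empty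
  let cap := (max max_samples 0).toNat
  -- texts[:cap] with 0 ≤ cap is List.take cap (exact: PySem.List.slice_to)
  (grouped.items.foldl (fun r p => r.insert p.1 (p.2.take cap)) (PySem.Dict.empty : PySem.Dict String (List String))).items

-- ===== PRECONDITION & SPEC =====
def Spec_gather_speaker_samples (segments : List (List (String × String))) (max_samples : Int) (out : List (String × List String)) : Prop := out = gather_speaker_samples_alt segments max_samples
instance (segments : List (List (String × String))) (max_samples : Int) (out : List (String × List String)) : Decidable (Spec_gather_speaker_samples segments max_samples out) := by unfold Spec_gather_speaker_samples; infer_instance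

-- ===== CLAIM (what is proved, stated in full; the proofs are below) =====
def Claim_equal_gather_speaker_samples : Prop := ∀ (segments : List (List (String × String))) (max_samples : Int), Dom_gather_speaker_samples segments max_samples → Spec_gather_speaker_samples segments max_samples (gather_speaker_samples segments max_samples)

-- ===== LEMMAS AND PROOFS =====

-- truncate every value of a dict to its first `cap` elements (proof-only helper)
def pvTrunc (cap : Nat) (g : PySem.Dict String (List String)) : PySem.Dict String (List String) :=
  PySem.Dict.mk (g.items.map (fun p => (p.1, p.2.take cap)))

theorem pv_contains_trunc (cap : Nat) (g : PySem.Dict String (List String)) (k : String) :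
    (pvTrunc cap g).contains k = g.contains k := by
  simp [pvTrunc, PySem.Dict.contains, List.any_map, Function.comp_def]

theorem pv_keys_trunc (cap : Nat) (g : PySem.Dict String (List String)) :
    (pvTrunc cap g).keys = g.keys := by
  simp [pvTrunc, PySem.Dict.keys, List.map_map, Function.comp_def]

theorem pv_get?_trunc (cap : Nat) (g : PySem.Dict String (List String)) (k : String) :
    (pvTrunc cap g).get? k = (g.get? k).map (fun v => v.take cap) := by
  simp [pvTrunc, PySem.Dict.get?, List.find?_map, Function.comp_def, Option.map_map]

theorem pv_getD_trunc (cap : Nat) (g : PySem.Dict String (List String)) (k : String) :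
    (pvTrunc cap g).getD k [] = (g.getD k []).take cap := by
  cases h : g.get? k <;>
    simp [PySem.Dict.getD_eq_get?_getD, pv_get?_trunc, h]

theorem pv_trunc_insert (cap : Nat) (g : PySem.Dict String (List String)) (k : String) (u : List String) :
    pvTrunc cap (g.insert k u) = (pvTrunc cap g).insert k (u.take cap) := by
  apply PySem.Dict.ext
  have h1 : (pvTrunc cap (g.insert k u)).items = (g.insert k u).items.map (fun p => (p.1, p.2.take cap)) := rfl
  have h2 : (pvTrunc cap g).items = g.items.map (fun p => (p.1, p.2.take cap)) := rfl
  rw [h1, PySem.Dict.items_insert, PySem.Dict.items_insert, pv_contains_trunc, h2]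
  by_cases h : g.contains k = true
  · simp only [h, if_pos, List.map_map]
    apply List.map_congr_left
    intro p _
    by_cases hk : p.1 = k
    · simp [hk]
    · simp [hk]
  · have h' : g.contains k = false := by simpa using h
    simp [h', List.map_append]

theorem pv_repl_id (k : String) (w : List String) :
    ∀ (l : List (String × List String)), (l.map Prod.fst).Nodup →
      l.find? (fun p => p.1 == k) = some (k, w) →
      l.map (fun p => if p.1 == k then (k, w) else p) = l := by
  intro l
  induction l with
  | nil => intro _ h; simp at h
  | cons a t ih =>
    intro hnd hf
    simp only [List.map_cons, List.nodup_cons] at hnd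
    obtain ⟨hna, hnt⟩ := hnd
    by_cases ha : (a.1 == k) = true
    · have hak : a.1 = k := by simpa using ha
      rw [List.find?_cons] at hf
      simp only [ha] at hf
      have haw : a = (k, w) := by simpa using hf
      subst haw
      simp only [List.map_cons, if_pos ha]
      congr 1
      have hmem : ∀ p ∈ t, (if p.1 == k then (k, w) else p) = id p := by
        intro p hp
        have hpk : p.1 ≠ k := by
          intro hpk
          apply hna
          have : p.1 ∈ t.map Prod.fst := List.mem_map_of_mem hp
          simpa [hak, hpk] using this
        simp [hpk]
      rw [List.map_congr_left hmem, List.map_id]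
    · have ha' : (a.1 == k) = false := by simpa using ha
      rw [List.find?_cons] at hf
      simp only [ha'] at hf
      simp only [List.map_cons, if_neg ha, ih hnt hf]

theorem pv_insert_get?_self (g : PySem.Dict String (List String)) (k : String) (w : List String)
    (hnd : g.keys.Nodup) (h : g.get? k = some w) : g.insert k w = g := by
  have hc : g.contains k = true := by
    rw [PySem.Dict.contains_eq_isSome_get?, h]; rfl
  obtain ⟨kk, hfind⟩ : ∃ kk, g.items.find? (fun p => p.1 == k) = some (kk, w) := by
    simp only [PySem.Dict.get?] at h
    cases hf : g.items.find? (fun p => p.1 == k) with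
    | none => simp [hf] at h
    | some p =>
      obtain ⟨p1, p2⟩ := p
      have hp2 : p2 = w := by rw [hf] at h; simpa using h
      exact ⟨p1, by rw [hp2]⟩
  have hkk : kk = k := by
    have := List.find?_some hfind
    simpa using this
  subst hkk
  simp only [PySem.Dict.insert, hc, if_pos]
  exact PySem.Dict.ext (pv_repl_id kk w g.items hnd hfind)

theorem pv_step (ms : Int) (g : PySem.Dict String (List String)) (seg : List (String × String))
    (hnd : g.keys.Nodup) :
    pvAStep ms (pvTrunc (max ms 0).toNat g) seg = pvTrunc (max ms 0).toNat (pvBGroupStep g seg) := by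
  set cap := (max ms 0).toNat with hcapdef
  have hcap : (cap : Int) = max ms 0 := Int.toNat_of_nonneg (le_max_right ms 0)
  unfold pvAStep pvBGroupStep
  set k := (PySem.Dict.mk seg).getD "speaker" "Unknown" with hk
  set t := PySem.Str.strip ((PySem.Dict.mk seg).getD "text" "")
  by_cases ht : t ≠ ""
  · simp only [ht, if_pos, ne_eq, not_false_eq_true]
    set v := g.getD k [] with hv
    have hmod : PySem.Dict.modify g k [] (· ++ [t]) = g.insert k (v ++ [t]) := rfl
    rw [hmod, pv_trunc_insert, pv_getD_trunc]
    have hlen : (v.take cap).length = min cap v.length := by simp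
    by_cases hlt : (((v.take cap).length : Int) < ms)
    · have hvlt : v.length < cap := by
        rw [hlen] at hlt
        omega
      have h1 : v.take cap = v := List.take_of_length_le (by omega)
      have h2 : (v ++ [t]).take cap = v ++ [t] := List.take_of_length_le (by simp; omega)
      rw [h1] at hlt ⊢
      rw [if_pos hlt, h2, pv_contains_trunc]
      by_cases hc : g.contains k = true
      · rw [if_pos hc]
      · rw [if_neg hc, PySem.Dict.insert_insert_self]
    · have hge : cap ≤ v.length := by
        rw [hlen] at hlt
        omega
      have h2 : (v ++ [t]).take cap = v.take cap := List.take_append_of_le_length hge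
      rw [if_neg hlt, h2, pv_contains_trunc]
      by_cases hc : g.contains k = true
      · rw [if_pos hc]
        obtain ⟨w, hw⟩ : ∃ w, g.get? k = some w := by
          rw [PySem.Dict.contains_eq_isSome_get?] at hc
          exact Option.isSome_iff_exists.mp hc
        have hwv : w = v := by rw [hv, PySem.Dict.getD_eq_get?_getD, hw]; rfl
        refine (pv_insert_get?_self (pvTrunc cap g) k (v.take cap) ?_ ?_).symm
        · rw [pv_keys_trunc]; exact hnd
        · rw [pv_get?_trunc, hw, hwv]; rfl
      · rw [if_neg hc]
        have hc' : g.contains k = false := by simpa using hc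
        have hv0 : v = [] := by rw [hv]; exact PySem.Dict.getD_of_not_contains g [] hc'
        rw [hv0]
        simp
  · simp at ht
    simp [ht]

theorem pv_nodup_B : ∀ (segs : List (List (String × String))) (g : PySem.Dict String (List String)),
    g.keys.Nodup → (segs.foldl pvBGroupStep g).keys.Nodup := by
  intro segs
  induction segs with
  | nil => intro g h; simpa using h
  | cons s t ih =>
    intro g h
    rw [List.foldl_cons]
    apply ih
    simp only [pvBGroupStep]
    split
    · exact PySem.Dict.nodup_keys_insert _ _ _ h
    · exact h

theorem pv_main (ms : Int) : ∀ (segs : List (List (String × String))) (g : PySem.Dict String (List String)),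
    g.keys.Nodup →
    segs.foldl (pvAStep ms) (pvTrunc (max ms 0).toNat g) = pvTrunc (max ms 0).toNat (segs.foldl pvBGroupStep g) := by
  intro segs
  induction segs with
  | nil => intro g _; rfl
  | cons s t ih =>
    intro g h
    rw [List.foldl_cons, List.foldl_cons, pv_step ms g s h]
    apply ih
    simp only [pvBGroupStep]
    split
    · exact PySem.Dict.nodup_keys_insert _ _ _ h
    · exact h

-- ===== VERDICT (by name: the statement is the Claim_ definition above) =====
theorem gather_speaker_samples_spec : Claim_equal_gather_speaker_samples := by
  intro segments max_samples _
  unfold Spec_gather_speaker_samples gather_speaker_samples gather_speaker_samples_alt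
  show (segments.foldl (pvAStep max_samples) PySem.Dict.empty).items
      = ((segments.foldl pvBGroupStep PySem.Dict.empty).items.foldl
          (fun r p => r.insert p.1 (p.2.take (max max_samples 0).toNat)) PySem.Dict.empty).items
  have hmain := pv_main max_samples segments PySem.Dict.empty PySem.Dict.nodup_keys_empty
  have hempty : pvTrunc (max max_samples 0).toNat (PySem.Dict.empty : PySem.Dict String (List String)) = PySem.Dict.empty := rfl
  rw [hempty] at hmain
  rw [hmain]
  have hnd : (segments.foldl pvBGroupStep PySem.Dict.empty).keys.Nodup :=
    pv_nodup_B segments PySem.Dict.empty PySem.Dict.nodup_keys_empty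
  have hfresh := PySem.Dict.items_foldl_insert_fresh (κ := String) (ν := List String)
    (segments.foldl pvBGroupStep PySem.Dict.empty).items Prod.fst
    (fun p => p.2.take (max max_samples 0).toNat) PySem.Dict.empty
    (fun a _ => PySem.Dict.contains_empty a.1) hnd
  simpa [pvTrunc] using hfresh.symm
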